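-- pv_equiv track=rewrite | github.com/beyondeye/aitasks | .aitask-scripts/lib/tui_switcher.py | _format_desync_lines
-- ===== SOURCE A (Python) =====
-- def _format_desync_lines(lines_output: str) -> str:
--     """Format `desync_state.py snapshot --format lines` output as one line.
--
--     Returns markup like ``main: 1↑/0↓ · aitask-data: 0↑/3↓`` or ``clean``
--     when both refs are at zero. Refs with non-ok status are surfaced as
--     e.g. ``main: missing_remote``.
--     """
--     refs: list[tuple[str, str, int, int]] = []  # (name, status, ahead, behind)
--     cur_name: str | None = None
--     cur_status: str = "ok"
--     cur_ahead: int = 0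
--     cur_behind: int = 0
--     for raw in lines_output.splitlines():
--         line = raw.strip()
--         if not line:
--             continue
--         if ":" not in line:
--             continue
--         key, _, val = line.partition(":")
--         key = key.strip()
--         val = val.strip()
--         if key == "REF":
--             if cur_name is not None:
--                 refs.append((cur_name, cur_status, cur_ahead, cur_behind))
--             cur_name = val
--             cur_status = "ok"
--             cur_ahead = 0
--             cur_behind = 0
--         elif key == "STATUS":
--             cur_status = val
--         elif key == "AHEAD":
--             try:
--                 cur_ahead = int(val)
--             except ValueError:
--                 cur_ahead = 0
--         elif key == "BEHIND":
--             try: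
--                 cur_behind = int(val)
--             except ValueError:
--                 cur_behind = 0
--     if cur_name is not None:
--         refs.append((cur_name, cur_status, cur_ahead, cur_behind))
--
--     if not refs:
--         return "[dim]desync: unavailable[/]"
--
--     parts: list[str] = []
--     any_drift = False
--     for name, status, ahead, behind in refs:
--         if status != "ok":
--             parts.append(f"{name}: [dim]{status}[/]")
--             continue
--         if ahead == 0 and behind == 0:
--             parts.append(f"[dim]{name}: clean[/]")
--         else:
--             parts.append(f"{name}: {ahead}↑/{behind}↓")
--             any_drift = True
--     if not any_drift:
--         return "[dim]all refs clean[/]"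
--     return " · ".join(parts)
-- ===== SOURCE B (Python) =====
-- def _parse_line(raw):
--     line = raw.strip()
--     if not line or ":" not in line:
--         return None
--     key, _, val = line.partition(":")
--     return (key.strip(), val.strip())
--
--
-- def _to_int(val):
--     try:
--         return int(val)
--     except ValueError:
--         return 0
--
--
-- def _group_blocks(kvs):
--     """Group key/value pairs into (name, body) blocks, one per REF line;
--     pairs before the first REF are discarded."""
--     blocks = []
--     i = 0
--     while i < len(kvs) and kvs[i][0] != "REF":
--         i += 1
--     while i < len(kvs):
--         name = kvs[i][1]
--         i += 1
--         body = []
--         while i < len(kvs) and kvs[i][0] != "REF":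
--             body.append(kvs[i])
--             i += 1
--         blocks.append((name, body))
--     return blocks
--
--
-- def _parse_block(name, body):
--     status, ahead, behind = "ok", 0, 0
--     for k, v in body:
--         if k == "STATUS":
--             status = v
--         elif k == "AHEAD":
--             ahead = _to_int(v)
--         elif k == "BEHIND":
--             behind = _to_int(v)
--     return (name, status, ahead, behind)
--
--
-- def _format_desync_lines(lines_output: str) -> str:
--     kvs = [p for raw in lines_output.splitlines() if (p := _parse_line(raw)) is not None]
--     refs = [_parse_block(name, body) for name, body in _group_blocks(kvs)]
--
--     if not refs:
--         return "[dim]desync: unavailable[/]"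
--
--     parts = []
--     any_drift = False
--     for name, status, ahead, behind in refs:
--         if status != "ok":
--             parts.append(f"{name}: [dim]{status}[/]")
--             continue
--         if ahead == 0 and behind == 0:
--             parts.append(f"[dim]{name}: clean[/]")
--         else:
--             parts.append(f"{name}: {ahead}↑/{behind}↓")
--             any_drift = True
--     if not any_drift:
--         return "[dim]all refs clean[/]"
--     return " · ".join(parts)
-- ===== Notes on version B (the rewrite author's own statement) =====
-- stated objective: alternative
-- what changed: Replaced A's single-pass flush-on-REF accumulator (five mutable loop variables, record emitted when the next REF or end of input is seen) with a two-phase decomposition: first group the parsed key/value lines into per-REF blocks (discarding lines before the first REF), then map each block independently to its (name, status, ahead, behind) record; the formatting pass is unchanged.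
import Mathlib
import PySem

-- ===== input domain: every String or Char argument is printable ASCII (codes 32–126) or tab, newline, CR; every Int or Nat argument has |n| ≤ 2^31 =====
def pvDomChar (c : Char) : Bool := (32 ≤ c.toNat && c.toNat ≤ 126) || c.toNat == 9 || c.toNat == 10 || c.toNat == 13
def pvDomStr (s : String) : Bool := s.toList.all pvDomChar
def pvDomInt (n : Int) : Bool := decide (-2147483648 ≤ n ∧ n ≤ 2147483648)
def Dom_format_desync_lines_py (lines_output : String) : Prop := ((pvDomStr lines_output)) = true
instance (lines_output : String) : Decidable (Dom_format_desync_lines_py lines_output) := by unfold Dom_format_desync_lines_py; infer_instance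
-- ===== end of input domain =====

-- B replaces A's flush-on-REF single-pass accumulator with a two-phase group-then-parse
-- decomposition (objective: alternative); same return value on every input.

-- Shared tail: the formatting loop over the parsed (name, status, ahead, behind) records;
-- it is textually the same code in both Pythons, factored here as one helper used by both ports.
def pvFormatRefs (refs : List (List Char × List Char × Int × Int)) : String :=
  if refs = [] then "[dim]desync: unavailable[/]"
  else
    let fr := refs.foldl (fun (acc : List (List Char) × Bool) r =>
      let (name, status, ahead, behind) := r
      if status ≠ ['o','k'] then
        (acc.1 ++ [name ++ (": [dim]".toList) ++ status ++ ("[/]".toList)], acc.2)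
      else if ahead = 0 ∧ behind = 0 then
        (acc.1 ++ [("[dim]".toList) ++ name ++ (": clean[/]".toList)], acc.2)
      else
        (acc.1 ++ [name ++ (": ".toList) ++ PySem.Int.toChars ahead ++ ("↑/".toList)
                   ++ PySem.Int.toChars behind ++ ("↓".toList)], true)) ([], false)
    if fr.2 = false then "[dim]all refs clean[/]"
    else String.ofList (PySem.Chars.join (" · ".toList) fr.1)

-- ===== PORT A =====
-- A's loop body: state (refs, cur_name, cur_status, cur_ahead, cur_behind), one raw line at a time.
def pvAStep
    (st : List (List Char × List Char × Int × Int) × Option (List Char) × List Char × Int × Int)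
    (raw : String) :
    List (List Char × List Char × Int × Int) × Option (List Char) × List Char × Int × Int :=
  let (refs, curName, curStatus, curAhead, curBehind) := st
  let line := PySem.Chars.strip raw.toList
  if line = [] then (refs, curName, curStatus, curAhead, curBehind)
  else if PySem.Chars.isIn [':'] line = false then (refs, curName, curStatus, curAhead, curBehind)
  else
    -- line.partition(":") for the one-char separator: text before / after the first ':'
    let key := PySem.Chars.strip (line.takeWhile (fun c => c ≠ ':'))
    let val := PySem.Chars.strip ((line.dropWhile (fun c => c ≠ ':')).drop 1)
    if key = ['R','E','F'] then
      ((match curName with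
        | some n => refs ++ [(n, curStatus, curAhead, curBehind)]
        | none => refs), some val, ['o','k'], 0, 0)
    else if key = ['S','T','A','T','U','S'] then (refs, curName, val, curAhead, curBehind)
    else if key = ['A','H','E','A','D'] then
      (refs, curName, curStatus, (PySem.Int.ofChars? val).getD 0, curBehind)
    else if key = ['B','E','H','I','N','D'] then
      (refs, curName, curStatus, curAhead, (PySem.Int.ofChars? val).getD 0)
    else (refs, curName, curStatus, curAhead, curBehind)

def format_desync_lines_py (lines_output : String) : String :=
  let st := (PySem.Str.splitlines lines_output).foldl pvAStep ([], none, ['o','k'], 0, 0)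
  let refs :=
    match st.2.1 with
    | some n => st.1 ++ [(n, st.2.2.1, st.2.2.2.1, st.2.2.2.2)]
    | none => st.1
  pvFormatRefs refs

-- ===== PORT B =====
-- Source B's _parse_line
def pvParseLine (raw : String) : Option (List Char × List Char) :=
  let line := PySem.Chars.strip raw.toList
  if line = [] then none
  else if PySem.Chars.isIn [':'] line then
    some (PySem.Chars.strip (line.takeWhile (fun c => c ≠ ':')),
          PySem.Chars.strip ((line.dropWhile (fun c => c ≠ ':')).drop 1))
  else none

-- Source B's _group_blocks: skip to the next REF, take its body up to the following REF, recurse.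
def pvGroupBlocks : List (List Char × List Char) → List (List Char × List (List Char × List Char))
  | [] => []
  | (k, v) :: rest =>
    if k = ['R','E','F'] then
      (v, rest.takeWhile (fun kv => kv.1 ≠ ['R','E','F']))
        :: pvGroupBlocks (rest.dropWhile (fun kv => kv.1 ≠ ['R','E','F']))
    else pvGroupBlocks rest
termination_by kvs => kvs.length
decreasing_by
  · exact Nat.lt_succ_of_le (List.length_dropWhile_le _ rest)
  · exact Nat.lt_succ_of_le (Nat.le_refl _)

-- Source B's _parse_block body step (last key occurrence wins, int failures → 0)
def pvBStep (st : List Char × Int × Int) (kv : List Char × List Char) : List Char × Int × Int :=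
  if kv.1 = ['S','T','A','T','U','S'] then (kv.2, st.2.1, st.2.2)
  else if kv.1 = ['A','H','E','A','D'] then (st.1, (PySem.Int.ofChars? kv.2).getD 0, st.2.2)
  else if kv.1 = ['B','E','H','I','N','D'] then (st.1, st.2.1, (PySem.Int.ofChars? kv.2).getD 0)
  else st

def pvParseBlock (name : List Char) (body : List (List Char × List Char)) :
    List Char × List Char × Int × Int :=
  let f := body.foldl pvBStep (['o','k'], 0, 0)
  (name, f.1, f.2.1, f.2.2)

def format_desync_lines_py_alt (lines_output : String) : String :=
  let kvs := (PySem.Str.splitlines lines_output).filterMap pvParseLine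
  let refs := (pvGroupBlocks kvs).map (fun b => pvParseBlock b.1 b.2)
  pvFormatRefs refs

-- ===== PRECONDITION & SPEC =====
def Spec_format_desync_lines_py (lines_output : String) (out : String) : Prop := out = format_desync_lines_py_alt lines_output
instance (lines_output : String) (out : String) : Decidable (Spec_format_desync_lines_py lines_output out) := by unfold Spec_format_desync_lines_py; infer_instance

-- ===== CLAIM (what is proved, stated in full; the proofs are below) =====
def Claim_equal_format_desync_lines_py : Prop := ∀ (lines_output : String), Dom_format_desync_lines_py lines_output → Spec_format_desync_lines_py lines_output (format_desync_lines_py lines_output)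

-- ===== LEMMAS AND PROOFS =====

-- A's loop body, restricted to an already-parsed key/value pair.
def pvAStepKV
    (st : List (List Char × List Char × Int × Int) × Option (List Char) × List Char × Int × Int)
    (kv : List Char × List Char) :
    List (List Char × List Char × Int × Int) × Option (List Char) × List Char × Int × Int :=
  let (refs, curName, curStatus, curAhead, curBehind) := st
  if kv.1 = ['R','E','F'] then
    ((match curName with
      | some n => refs ++ [(n, curStatus, curAhead, curBehind)]
      | none => refs), some kv.2, ['o','k'], 0, 0)
  else if kv.1 = ['S','T','A','T','U','S'] then (refs, curName, kv.2, curAhead, curBehind)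
  else if kv.1 = ['A','H','E','A','D'] then
    (refs, curName, curStatus, (PySem.Int.ofChars? kv.2).getD 0, curBehind)
  else if kv.1 = ['B','E','H','I','N','D'] then
    (refs, curName, curStatus, curAhead, (PySem.Int.ofChars? kv.2).getD 0)
  else (refs, curName, curStatus, curAhead, curBehind)

lemma pvAStep_eq_parse
    (st : List (List Char × List Char × Int × Int) × Option (List Char) × List Char × Int × Int)
    (raw : String) :
    pvAStep st raw = match pvParseLine raw with
      | none => st
      | some kv => pvAStepKV st kv := by
  obtain ⟨refs, curName, curStatus, curAhead, curBehind⟩ := st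
  simp only [pvAStep, pvParseLine, pvAStepKV]
  by_cases h1 : PySem.Chars.strip raw.toList = [] <;>
    by_cases h2 : PySem.Chars.isIn [':'] (PySem.Chars.strip raw.toList) = true <;>
      simp [h1, h2]

-- Finalisation of A's loop state into the list of records.
def pvFinalize
    (st : List (List Char × List Char × Int × Int) × Option (List Char) × List Char × Int × Int) :
    List (List Char × List Char × Int × Int) :=
  match st.2.1 with
  | some n => st.1 ++ [(n, st.2.2.1, st.2.2.2.1, st.2.2.2.2)]
  | none => st.1

-- B's block parse started from an arbitrary (status, ahead, behind) state.
def pvParseBlockFrom (name s : List Char) (a b : Int) (body : List (List Char × List Char)) :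
    List Char × List Char × Int × Int :=
  let f := body.foldl pvBStep (s, a, b)
  (name, f.1, f.2.1, f.2.2)

-- The loop invariant: running A's accumulator over kvs and flushing equals
-- B's group-then-parse of kvs, with an open block carried in the `some` case.
lemma pvMain (kvs : List (List Char × List Char))
    (refs : List (List Char × List Char × Int × Int))
    (curName : Option (List Char)) (s : List Char) (a b : Int) :
    pvFinalize (kvs.foldl pvAStepKV (refs, curName, s, a, b)) =
      refs ++ (match curName with
        | none => (pvGroupBlocks kvs).map (fun bl => pvParseBlock bl.1 bl.2)
        | some n =>
            pvParseBlockFrom n s a b (kvs.takeWhile (fun kv => kv.1 ≠ ['R','E','F']))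
              :: (pvGroupBlocks (kvs.dropWhile (fun kv => kv.1 ≠ ['R','E','F']))).map
                   (fun bl => pvParseBlock bl.1 bl.2)) := by
  induction kvs generalizing refs curName s a b with
  | nil =>
    cases curName <;> simp [pvFinalize, pvParseBlockFrom, pvGroupBlocks]
  | cons kv rest ih =>
    obtain ⟨k, v⟩ := kv
    by_cases hk : k = ['R','E','F']
    · cases curName with
      | none =>
        simp only [List.foldl_cons, pvAStepKV, hk, if_true]
        rw [ih]
        simp [pvGroupBlocks, pvParseBlock, pvParseBlockFrom]
      | some n =>
        simp only [List.foldl_cons, pvAStepKV, hk, if_true]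
        rw [ih]
        simp [pvGroupBlocks, pvParseBlock, pvParseBlockFrom]
    · have hstep : ∀ (st2 : List Char × Int × Int),
          pvAStepKV (refs, curName, st2.1, st2.2.1, st2.2.2) (k, v)
            = (refs, curName, (pvBStep st2 (k, v)).1, (pvBStep st2 (k, v)).2.1,
               (pvBStep st2 (k, v)).2.2) := by
        intro st2
        simp only [pvAStepKV, pvBStep, hk]
        by_cases h1 : k = ['S','T','A','T','U','S'] <;>
          by_cases h2 : k = ['A','H','E','A','D'] <;>
            by_cases h3 : k = ['B','E','H','I','N','D'] <;>
              simp [h1, h2, h3]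
      cases curName with
      | none =>
        simp only [List.foldl_cons]
        rw [show pvAStepKV (refs, none, s, a, b) (k, v)
              = (refs, none, (pvBStep (s,a,b) (k,v)).1, (pvBStep (s,a,b) (k,v)).2.1,
                 (pvBStep (s,a,b) (k,v)).2.2) from hstep (s,a,b)]
        rw [ih]
        simp [pvGroupBlocks, hk]
      | some n =>
        simp only [List.foldl_cons]
        rw [show pvAStepKV (refs, some n, s, a, b) (k, v)
              = (refs, some n, (pvBStep (s,a,b) (k,v)).1, (pvBStep (s,a,b) (k,v)).2.1,
                 (pvBStep (s,a,b) (k,v)).2.2) from hstep (s,a,b)]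
        rw [ih]
        simp only [List.takeWhile_cons, List.dropWhile_cons, hk, ne_eq,
          decide_eq_true_eq]
        simp [pvParseBlockFrom, List.foldl_cons]

-- ===== VERDICT (by name: the statement is the Claim_ definition above) =====
theorem format_desync_lines_py_spec : Claim_equal_format_desync_lines_py := by
  intro lines_output _
  unfold Spec_format_desync_lines_py
  unfold format_desync_lines_py format_desync_lines_py_alt
  have hfold : (PySem.Str.splitlines lines_output).foldl pvAStep ([], none, ['o','k'], 0, 0)
      = ((PySem.Str.splitlines lines_output).filterMap pvParseLine).foldl pvAStepKV
          ([], none, ['o','k'], 0, 0) := by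
    rw [List.foldl_filterMap,
      show pvAStep = (fun st raw => match pvParseLine raw with
        | some kv => pvAStepKV st kv
        | none => st) from
          funext fun st => funext fun raw => by
            rw [pvAStep_eq_parse]; cases pvParseLine raw <;> rfl]
    congr 1
    funext x y
    cases pvParseLine y <;> rfl
  have h := pvMain ((PySem.Str.splitlines lines_output).filterMap pvParseLine)
      [] none ['o','k'] 0 0
  simp only [pvFinalize] at h
  simp only [hfold]
  exact congrArg pvFormatRefs (by simpa using h)
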